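-- pv_equiv track=rewrite | github.com/achrafoo2018/codeforces | 2doors.py | find_smallest_array
-- ===== SOURCE A (Python) =====
-- def find_smallest_array(n, q, statements):
--     graph = create_graph(n, statements)
--     array = [0] * n
--
--     topological_order = topological_sort(graph)
--
--     for vertex in topological_order:
--         min_value = 0
--         for neighbor in graph[vertex]:
--             neighbor_value = array[neighbor[0]-1] | neighbor[1]
--             min_value = max(min_value, neighbor_value)
--         array[vertex-1] = min_value
--
--     return array
--
-- def create_graph(n, statements):
--     graph = {i: [] for i in range(1, n+1)}
--     for i, j, x in statements:
--         graph[i].append((j, x))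
--     return graph
--
-- def topological_sort(graph):
--     visited = set()
--     topological_order = []
--
--     def dfs(vertex):
--         visited.add(vertex)
--         for neighbor in graph[vertex]:
--             if neighbor[0] not in visited:
--                 dfs(neighbor[0])
--         topological_order.append(vertex)
--
--     for vertex in graph:
--         if vertex not in visited:
--             dfs(vertex)
--
--     return topological_order[::-1]
-- ===== SOURCE B (Python) =====
-- def find_smallest_array(n, q, statements):
--     adj = {i: [] for i in range(1, n + 1)}
--     for i, j, x in statements:
--         adj[i].append((j, x))
--
--     # reverse-postorder via an explicit-stack DFS (frames hold a neighbor index)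
--     visited = set()
--     post = []
--     for root in adj:
--         if root in visited:
--             continue
--         visited.add(root)
--         stack = [(root, 0)]
--         while stack:
--             v, k = stack.pop()
--             nbrs = adj[v]
--             if k == len(nbrs):
--                 post.append(v)
--             else:
--                 stack.append((v, k + 1))
--                 j = nbrs[k][0]
--                 if j not in visited:
--                     visited.add(j)
--                     stack.append((j, 0))
--
--     array = [0] * n
--     for v in reversed(post):
--         best = 0
--         for j, x in adj[v]:
--             best = max(best, array[j - 1] | x)
--         array[v - 1] = best
--     return array
-- ===== Notes on version B (the rewrite author's own statement) =====
-- stated objective: alternative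
-- what changed: The recursive closure-based DFS of topological_sort is replaced by an iterative explicit-stack DFS whose frames hold a vertex and a neighbor index, producing the identical reverse postorder without Python recursion; graph construction and the relaxation pass are unchanged.
import Mathlib
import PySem

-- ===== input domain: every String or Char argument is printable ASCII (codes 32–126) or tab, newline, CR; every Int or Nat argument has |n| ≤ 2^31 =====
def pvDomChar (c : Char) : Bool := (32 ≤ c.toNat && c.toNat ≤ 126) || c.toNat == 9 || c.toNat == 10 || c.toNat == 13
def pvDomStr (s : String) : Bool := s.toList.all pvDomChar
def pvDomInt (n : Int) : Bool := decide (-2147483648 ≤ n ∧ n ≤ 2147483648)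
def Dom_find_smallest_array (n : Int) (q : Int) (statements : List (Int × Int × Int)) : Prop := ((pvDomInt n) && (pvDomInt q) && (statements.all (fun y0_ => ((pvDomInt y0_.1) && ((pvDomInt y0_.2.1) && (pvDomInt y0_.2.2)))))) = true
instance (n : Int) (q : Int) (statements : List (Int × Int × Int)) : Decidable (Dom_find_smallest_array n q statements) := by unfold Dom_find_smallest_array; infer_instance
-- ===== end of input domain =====

-- B replaces A's recursive closure DFS by an explicit-stack DFS with neighbor-index
-- frames producing the same reverse postorder; objective: alternative decomposition.

-- ===== PORT A =====
-- create_graph: {i: [] for i in range(1, n+1)} then graph[i].append((j, x)).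
-- (Dict.modify inserts a missing key where Python raises KeyError — outside Pre_.)
def pvGraphA (n : Int) (statements : List (Int × Int × Int)) : PySem.Dict Int (List (Int × Int)) :=
  statements.foldl (fun g s => g.modify s.1 [] (fun l => l ++ [(s.2.1, s.2.2)]))
    ((PySem.List.pyRange 1 (n + 1) 1).foldl (fun g i => g.insert i []) PySem.Dict.empty)

-- all vertices the DFS can ever visit: keys plus every edge target
def pvUniv (g : PySem.Dict Int (List (Int × Int))) : List Int :=
  g.keys ++ (g.values.flatten).map Prod.fst

-- fuel bounding the recursion depth of dfs (each nested call visits a new pvUniv vertex)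
def pvFuel (g : PySem.Dict Int (List (Int × Int))) : Nat := (pvUniv g).length + 1

-- the recursive dfs closure, fueled (fuel never runs out: each call starts at an
-- unvisited vertex of pvUniv; none = fuel exhausted, proved unreachable below).
-- graph[vertex] is getD v [] : [] where Python raises KeyError — outside Pre_.
mutual
def pvDfsA (g : PySem.Dict Int (List (Int × Int))) :
    Nat → Int → (PySem.Set Int × List Int) → Option (PySem.Set Int × List Int)
  | 0, _, _ => none
  | f + 1, v, st =>
    (pvNbrsA g f (g.getD v []) (PySem.Set.add st.1 v, st.2)).map
      (fun st2 => (st2.1, st2.2 ++ [v]))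
termination_by f => (f, 0)

def pvNbrsA (g : PySem.Dict Int (List (Int × Int))) :
    Nat → List (Int × Int) → (PySem.Set Int × List Int) → Option (PySem.Set Int × List Int)
  | _, [], st => some st
  | f, p :: rest, st =>
    if PySem.Set.contains st.1 p.1 then pvNbrsA g f rest st
    else (pvDfsA g f p.1 st).bind (pvNbrsA g f rest)
termination_by f ns => (f, ns.length + 1)
end

-- topological_sort: for vertex in graph: if unvisited: dfs(vertex); return order[::-1]
def pvTopoA (g : PySem.Dict Int (List (Int × Int))) : List Int :=
  let res := g.keys.foldl
    (fun ost v => ost.bind (fun st =>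
      if PySem.Set.contains st.1 v then some st else pvDfsA g (pvFuel g) v st))
    (some (PySem.Set.empty, []))
  ((res.getD (PySem.Set.empty, [])).2).reverse

-- the relaxation pass (pyGetD/pySetD total forms: in range under Pre_)
def pvPropA (g : PySem.Dict Int (List (Int × Int))) (order : List Int) (arr0 : List Int) :
    List Int :=
  order.foldl (fun arr v =>
    PySem.List.pySetD arr (v - 1)
      ((g.getD v []).foldl
        (fun m p => max m (PySem.Int.bor (PySem.List.pyGetD arr (p.1 - 1) 0) p.2)) 0)) arr0

def find_smallest_array (n : Int) (q : Int) (statements : List (Int × Int × Int)) : List Int :=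
  let graph := pvGraphA n statements
  pvPropA graph (pvTopoA graph) (List.replicate n.toNat 0)

-- ===== PORT B =====
def pvGraphB (n : Int) (statements : List (Int × Int × Int)) : PySem.Dict Int (List (Int × Int)) :=
  statements.foldl (fun g s => g.modify s.1 [] (fun l => l ++ [(s.2.1, s.2.2)]))
    ((PySem.List.pyRange 1 (n + 1) 1).foldl (fun g i => g.insert i []) PySem.Dict.empty)

-- termination measure components for the stack loop
def pvPhi (g : PySem.Dict Int (List (Int × Int))) (vis : PySem.Set Int) : Nat :=
  ((pvUniv g).filter (fun u => ! PySem.Set.contains vis u)).length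

def pvWeight (g : PySem.Dict Int (List (Int × Int))) (stack : List (Int × Nat)) : Nat :=
  (stack.map (fun fr => (g.getD fr.1 []).length + 1 - fr.2)).sum

theorem pvGetD_values (g : PySem.Dict Int (List (Int × Int))) (v : Int) :
    g.getD v [] = [] ∨ g.getD v [] ∈ g.values := by
  cases h : g.get? v with
  | none => left; simp [PySem.Dict.getD_eq_get?_getD, h]
  | some l =>
    right
    have hit := PySem.Dict.mem_items_of_get?_eq_some (d := g) h
    have hv : l ∈ g.values := by
      simp only [PySem.Dict.values]
      exact List.mem_map.2 ⟨(v, l), hit, rfl⟩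
    simpa [PySem.Dict.getD_eq_get?_getD, h] using hv

theorem pvMem_univ {g : PySem.Dict Int (List (Int × Int))} {v : Int} {k : Nat}
    (h : k < (g.getD v []).length) : ((g.getD v [])[k]).1 ∈ pvUniv g := by
  rcases pvGetD_values g v with h0 | h0
  · rw [h0] at h; simp at h
  · have hm : (g.getD v [])[k] ∈ g.values.flatten :=
      List.mem_flatten.2 ⟨g.getD v [], h0, List.getElem_mem h⟩
    exact List.mem_append_right _ (List.mem_map.2 ⟨_, hm, rfl⟩)

theorem pvFilter_le {α : Type} {p q : α → Bool} {l : List α}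
    (himp : ∀ a ∈ l, q a = true → p a = true) :
    (l.filter q).length ≤ (l.filter p).length := by
  induction l with
  | nil => simp
  | cons x xs ih =>
    have ih' := ih (fun a ha => himp a (List.mem_cons_of_mem _ ha))
    cases hq : q x
    · cases hp : p x <;> simp [hq, hp] <;> omega
    · have hp := himp x (List.mem_cons_self) hq
      simp [hq, hp]; omega

theorem pvFilter_lt {α : Type} {l : List α} {p q : α → Bool}
    (himp : ∀ a ∈ l, q a = true → p a = true) {a0 : α} (ha0 : a0 ∈ l)
    (hp : p a0 = true) (hq : q a0 = false) :
    (l.filter q).length < (l.filter p).length := by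
  induction l with
  | nil => cases ha0
  | cons x xs ih =>
    rcases List.mem_cons.1 ha0 with rfl | hmem
    · have hle : (xs.filter q).length ≤ (xs.filter p).length :=
        pvFilter_le (fun a ha => himp a (List.mem_cons_of_mem _ ha))
      simp [hp, hq]; omega
    · have ih' := ih (fun a ha => himp a (List.mem_cons_of_mem _ ha)) hmem
      cases hqx : q x
      · cases hpx : p x <;> simp [hqx, hpx] <;> omega
      · have hpx := himp x (List.mem_cons_self) hqx
        simp [hqx, hpx]; omega

theorem pvPhi_lt {g : PySem.Dict Int (List (Int × Int))} {vis : PySem.Set Int} {j : Int}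
    (hj : j ∈ pvUniv g) (hnv : PySem.Set.contains vis j = false) :
    pvPhi g (PySem.Set.add vis j) < pvPhi g vis := by
  refine pvFilter_lt ?_ hj ?_ ?_
  · intro a _ hq
    rw [Bool.not_eq_true'] at hq ⊢
    cases hca : PySem.Set.contains vis a with
    | false => rfl
    | true =>
      have hmem : a ∈ PySem.Set.add vis j :=
        (PySem.Set.mem_add _ _ _).2 (Or.inl ((PySem.Set.contains_iff _ _).1 hca))
      have h2 := (PySem.Set.contains_iff (PySem.Set.add vis j) a).2 hmem
      rw [h2] at hq; cases hq
  · rw [Bool.not_eq_true']; exact hnv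
  · rw [Bool.not_eq_false']
    exact (PySem.Set.contains_iff _ _).2 ((PySem.Set.mem_add _ _ _).2 (Or.inr rfl))

-- the explicit-stack DFS loop of B; returns (visited, post)
def pvLoopB (g : PySem.Dict Int (List (Int × Int))) :
    List (Int × Nat) → PySem.Set Int → List Int → (PySem.Set Int × List Int)
  | [], vis, post => (vis, post)
  | (v, k) :: rest, vis, post =>
    if h : k < (g.getD v []).length then
      if hv : PySem.Set.contains vis ((g.getD v [])[k]).1 then
        pvLoopB g ((v, k + 1) :: rest) vis post
      else
        pvLoopB g ((((g.getD v [])[k]).1, 0) :: (v, k + 1) :: rest)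
          (PySem.Set.add vis ((g.getD v [])[k]).1) post
    else pvLoopB g rest vis (post ++ [v])
termination_by stack vis _ => (pvPhi g vis, pvWeight g stack + stack.length)
decreasing_by
  · apply Prod.Lex.right
    simp only [pvWeight, List.map_cons, List.sum_cons, List.length_cons]
    omega
  · apply Prod.Lex.left
    exact pvPhi_lt (pvMem_univ h) (by simpa using hv)
  · apply Prod.Lex.right
    simp only [pvWeight, List.map_cons, List.sum_cons, List.length_cons]
    omega

-- for root in adj: if unvisited: add root, run the stack loop
def pvOuterB (g : PySem.Dict Int (List (Int × Int))) : (PySem.Set Int × List Int) :=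
  g.keys.foldl (fun st v =>
    if PySem.Set.contains st.1 v then st
    else pvLoopB g [(v, 0)] (PySem.Set.add st.1 v) st.2) (PySem.Set.empty, [])

def pvPropB (g : PySem.Dict Int (List (Int × Int))) (order : List Int) (arr0 : List Int) :
    List Int :=
  order.foldl (fun arr v =>
    PySem.List.pySetD arr (v - 1)
      ((g.getD v []).foldl
        (fun m p => max m (PySem.Int.bor (PySem.List.pyGetD arr (p.1 - 1) 0) p.2)) 0)) arr0

def find_smallest_array_alt (n : Int) (q : Int) (statements : List (Int × Int × Int)) : List Int :=
  let adj := pvGraphB n statements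
  pvPropB adj (pvOuterB adj).2.reverse (List.replicate n.toNat 0)

-- ===== PRECONDITION & SPEC =====
-- Pre_ excludes statements naming a vertex outside 1..n, on which A raises KeyError.
def Pre_find_smallest_array (n : Int) (q : Int) (statements : List (Int × Int × Int)) : Prop :=
  ∀ s ∈ statements, 1 ≤ s.1 ∧ s.1 ≤ n ∧ 1 ≤ s.2.1 ∧ s.2.1 ≤ n
instance (n : Int) (q : Int) (statements : List (Int × Int × Int)) : Decidable (Pre_find_smallest_array n q statements) := by unfold Pre_find_smallest_array; infer_instance

def pvWitness_find_smallest_array : Int × Int × (List (Int × Int × Int)) :=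
  (3, 2, [(1, 2, 5), (2, 3, 1), (3, 1, -4)])

def Spec_find_smallest_array (n : Int) (q : Int) (statements : List (Int × Int × Int)) (out : List Int) : Prop := out = find_smallest_array_alt n q statements
instance (n : Int) (q : Int) (statements : List (Int × Int × Int)) (out : List Int) : Decidable (Spec_find_smallest_array n q statements out) := by unfold Spec_find_smallest_array; infer_instance

-- ===== CLAIM (what is proved, stated in full; the proofs are below) =====
def Claim_equal_find_smallest_array : Prop := ∀ (n : Int) (q : Int) (statements : List (Int × Int × Int)), Dom_find_smallest_array n q statements → Pre_find_smallest_array n q statements → Spec_find_smallest_array n q statements (find_smallest_array n q statements)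

-- ===== LEMMAS AND PROOFS =====

theorem pvAdj_univ {g : PySem.Dict Int (List (Int × Int))} {v : Int} {p : Int × Int}
    (hp : p ∈ g.getD v []) : p.1 ∈ pvUniv g := by
  rcases pvGetD_values g v with h0 | h0
  · rw [h0] at hp; cases hp
  · exact List.mem_append_right _
      (List.mem_map.2 ⟨p, List.mem_flatten.2 ⟨g.getD v [], h0, hp⟩, rfl⟩)

theorem pvContains_add_mono {s : PySem.Set Int} {x u : Int}
    (h : PySem.Set.contains s u = true) :
    PySem.Set.contains (PySem.Set.add s x) u = true :=
  (PySem.Set.contains_iff _ _).2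
    ((PySem.Set.mem_add _ _ _).2 (Or.inl ((PySem.Set.contains_iff _ _).1 h)))

theorem pvPhi_le (g : PySem.Dict Int (List (Int × Int))) (vis : PySem.Set Int) :
    pvPhi g vis ≤ (pvUniv g).length :=
  List.length_filter_le _ _

theorem pvPhi_mono {g : PySem.Dict Int (List (Int × Int))} {s s' : PySem.Set Int}
    (h : ∀ u, PySem.Set.contains s u = true → PySem.Set.contains s' u = true) :
    pvPhi g s' ≤ pvPhi g s := by
  refine pvFilter_le ?_
  intro a _ hq
  rw [Bool.not_eq_true'] at hq ⊢
  cases hca : PySem.Set.contains s a with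
  | false => rfl
  | true => rw [h a hca] at hq; cases hq

-- visited only grows through pvNbrsA / pvDfsA
theorem pvMonoN (g : PySem.Dict Int (List (Int × Int))) :
    ∀ f ns st st', pvNbrsA g f ns st = some st' →
      ∀ u, PySem.Set.contains st.1 u = true → PySem.Set.contains st'.1 u = true := by
  intro f
  induction f using Nat.strong_induction_on with
  | _ f IHf =>
  intro ns
  induction ns with
  | nil => intro st st' h u hu; rw [pvNbrsA] at h; cases h; exact hu
  | cons p rest ih =>
    intro st st' h u hu
    rw [pvNbrsA] at h
    by_cases hc : PySem.Set.contains st.1 p.1 = true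
    · rw [if_pos hc] at h; exact ih st st' h u hu
    · rw [if_neg hc] at h
      obtain ⟨stm, hd, hn⟩ := Option.bind_eq_some_iff.1 h
      cases f with
      | zero => rw [pvDfsA] at hd; cases hd
      | succ m =>
        rw [pvDfsA] at hd
        obtain ⟨st2, h2, hst⟩ := Option.map_eq_some_iff.1 hd
        have hu2 : PySem.Set.contains st2.1 u = true :=
          IHf m (Nat.lt_succ_self m) _ _ _ h2 u (pvContains_add_mono hu)
        have hum : PySem.Set.contains stm.1 u = true := by rw [← hst]; exact hu2
        exact ih stm st' hn u hum

theorem pvPhi_pos {g : PySem.Dict Int (List (Int × Int))} {vis : PySem.Set Int} {j : Int}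
    (hj : j ∈ pvUniv g) (hnv : PySem.Set.contains vis j = false) : 1 ≤ pvPhi g vis := by
  have hnm : j ∉ vis := fun hm => by
    rw [(PySem.Set.contains_iff _ _).2 hm] at hnv; cases hnv
  have hmem : j ∈ (pvUniv g).filter (fun u => ! PySem.Set.contains vis u) :=
    List.mem_filter.2 ⟨hj, by simpa using hnm⟩
  have h := List.length_pos_of_mem hmem
  unfold pvPhi
  omega

-- with enough fuel, pvNbrsA never runs out
theorem pvSuffN (g : PySem.Dict Int (List (Int × Int))) :
    ∀ f ns, (∀ p ∈ ns, p.1 ∈ pvUniv g) → ∀ st : PySem.Set Int × List Int,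
      pvPhi g st.1 ≤ f → ∃ st', pvNbrsA g f ns st = some st' := by
  intro f
  induction f using Nat.strong_induction_on with
  | _ f IHf =>
  intro ns
  induction ns with
  | nil => intro _ st _; exact ⟨st, by rw [pvNbrsA]⟩
  | cons p rest ih =>
    intro hmem st hφ
    by_cases hc : PySem.Set.contains st.1 p.1 = true
    · obtain ⟨st', h⟩ := ih (fun p' hp' => hmem p' (List.mem_cons_of_mem _ hp')) st hφ
      exact ⟨st', by rw [pvNbrsA, if_pos hc]; exact h⟩
    · have hj : p.1 ∈ pvUniv g := hmem p List.mem_cons_self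
      have hc' : PySem.Set.contains st.1 p.1 = false := by
        cases h : PySem.Set.contains st.1 p.1
        · rfl
        · exact absurd h hc
      have h1 : 1 ≤ pvPhi g st.1 := pvPhi_pos hj hc'
      cases f with
      | zero => omega
      | succ m =>
        have hφ' : pvPhi g (PySem.Set.add st.1 p.1) ≤ m := by
          have := pvPhi_lt hj hc'
          omega
        obtain ⟨st2, h2⟩ := IHf m (Nat.lt_succ_self m) (g.getD p.1 [])
          (fun p' hp' => pvAdj_univ hp') (PySem.Set.add st.1 p.1, st.2) hφ'
        have hd : pvDfsA g (m + 1) p.1 st = some (st2.1, st2.2 ++ [p.1]) := by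
          rw [pvDfsA, h2]; rfl
        have hφ2 : pvPhi g st2.1 ≤ m + 1 := by
          have hmono : pvPhi g st2.1 ≤ pvPhi g (PySem.Set.add st.1 p.1) :=
            pvPhi_mono (fun u hu => pvMonoN g m _ _ _ h2 u hu)
          omega
        obtain ⟨st', h'⟩ := ih (fun p' hp' => hmem p' (List.mem_cons_of_mem _ hp'))
          (st2.1, st2.2 ++ [p.1]) hφ2
        refine ⟨st', ?_⟩
        rw [pvNbrsA, if_neg hc, hd]
        exact h'

-- the heart: one recursive dfs frame equals the stack machine processing that frame
theorem pvBridge (g : PySem.Dict Int (List (Int × Int))) :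
    ∀ f m v k (vis : PySem.Set Int) (ord : List Int) vis' ord' rest,
      (g.getD v []).length - k ≤ m →
      pvNbrsA g f ((g.getD v []).drop k) (vis, ord) = some (vis', ord') →
      pvLoopB g ((v, k) :: rest) vis ord = pvLoopB g rest vis' (ord' ++ [v]) := by
  intro f
  induction f using Nat.strong_induction_on with
  | _ f IHf =>
  intro m
  induction m with
  | zero =>
    intro v k vis ord vis' ord' rest hm h
    have hk : ¬ k < (g.getD v []).length := by omega
    rw [List.drop_of_length_le (by omega)] at h
    rw [pvNbrsA] at h
    cases h
    rw [pvLoopB, dif_neg hk]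
  | succ m IHm =>
    intro v k vis ord vis' ord' rest hm h
    by_cases hk : k < (g.getD v []).length
    · rw [List.drop_eq_getElem_cons hk, pvNbrsA] at h
      by_cases hc : PySem.Set.contains vis ((g.getD v [])[k]).1 = true
      · rw [if_pos hc] at h
        rw [pvLoopB, dif_pos hk, dif_pos hc]
        exact IHm v (k + 1) vis ord vis' ord' rest (by omega) h
      · rw [if_neg hc] at h
        obtain ⟨stj, hd, hn⟩ := Option.bind_eq_some_iff.1 h
        cases f with
        | zero => rw [pvDfsA] at hd; cases hd
        | succ fm =>
          rw [pvDfsA] at hd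
          obtain ⟨st2, h2, hst⟩ := Option.map_eq_some_iff.1 hd
          rw [pvLoopB, dif_pos hk, dif_neg hc]
          have hb1 := IHf fm (Nat.lt_succ_self fm) ((g.getD ((g.getD v [])[k]).1 []).length)
            ((g.getD v [])[k]).1 0 (PySem.Set.add vis ((g.getD v [])[k]).1) ord
            st2.1 st2.2 ((v, k + 1) :: rest) (by omega) (by simpa using h2)
          rw [hb1]
          have hstj : stj = (st2.1, st2.2 ++ [((g.getD v [])[k]).1]) := hst.symm
          rw [hstj] at hn
          exact IHm v (k + 1) st2.1 (st2.2 ++ [((g.getD v [])[k]).1]) vis' ord' rest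
            (by omega) hn
    · rw [List.drop_of_length_le (by omega), pvNbrsA] at h
      cases h
      rw [pvLoopB, dif_neg hk]

-- outer loops over the keys agree
theorem pvOuterEq (g : PySem.Dict Int (List (Int × Int))) :
    ∀ ks : List Int, (∀ v ∈ ks, v ∈ pvUniv g) → ∀ st : PySem.Set Int × List Int,
      ks.foldl (fun ost v => ost.bind (fun st =>
          if PySem.Set.contains st.1 v then some st else pvDfsA g (pvFuel g) v st))
        (some st)
      = some (ks.foldl (fun st v =>
          if PySem.Set.contains st.1 v then st
          else pvLoopB g [(v, 0)] (PySem.Set.add st.1 v) st.2) st) := by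
  intro ks
  induction ks with
  | nil => intro _ st; rfl
  | cons v ks ih =>
    intro hmem st
    simp only [List.foldl_cons, Option.bind_some]
    by_cases hc : PySem.Set.contains st.1 v = true
    · rw [if_pos hc, if_pos hc]
      exact ih (fun u hu => hmem u (List.mem_cons_of_mem _ hu)) st
    · have hc' : PySem.Set.contains st.1 v = false := by
        cases h : PySem.Set.contains st.1 v
        · rfl
        · exact absurd h hc
      rw [if_neg hc, if_neg hc]
      have hφ : pvPhi g (PySem.Set.add st.1 v) ≤ (pvUniv g).length := pvPhi_le g _
      obtain ⟨st2, h2⟩ := pvSuffN g ((pvUniv g).length) (g.getD v [])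
        (fun p hp => pvAdj_univ hp) (PySem.Set.add st.1 v, st.2) hφ
      have hd : pvDfsA g (pvFuel g) v st = some (st2.1, st2.2 ++ [v]) := by
        rw [pvFuel, pvDfsA, h2]; rfl
      have hb : pvLoopB g [(v, 0)] (PySem.Set.add st.1 v) st.2
          = (st2.1, st2.2 ++ [v]) := by
        have := pvBridge g ((pvUniv g).length) ((g.getD v []).length) v 0
          (PySem.Set.add st.1 v) st.2 st2.1 st2.2 [] (by omega) (by simpa using h2)
        rw [this, pvLoopB]
      rw [hd, hb]
      exact ih (fun u hu => hmem u (List.mem_cons_of_mem _ hu)) _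

theorem pvKeys_univ (g : PySem.Dict Int (List (Int × Int))) :
    ∀ v ∈ g.keys, v ∈ pvUniv g := fun _ hv => List.mem_append_left _ hv

theorem pvTopo_eq_outer (g : PySem.Dict Int (List (Int × Int))) :
    pvTopoA g = (pvOuterB g).2.reverse := by
  rw [pvTopoA, pvOuterB, pvOuterEq g g.keys (pvKeys_univ g) (PySem.Set.empty, [])]
  rfl

-- ===== VERDICT (by name: the statement is the Claim_ definition above) =====
theorem find_smallest_array_spec : Claim_equal_find_smallest_array := by
  intro n q statements _ _
  unfold Spec_find_smallest_array
  have hg : pvGraphA n statements = pvGraphB n statements := rfl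
  have hp : pvPropA = pvPropB := rfl
  simp only [find_smallest_array, find_smallest_array_alt]
  rw [← hg, hp, pvTopo_eq_outer]
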